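-- pv_equiv track=rewrite | github.com/nickbel7/ntua-software-engineering | test-cli/test.py | pa_param
-- ===== SOURCE A (Python) =====
-- def pa_param(line):
--     ret=[]
--     check=True
--     for i in range (len(line[0])):
--         if line[0][i]=="-":
--             continue
--         if check:
--             ret.append(line[0][i:(i+2)])
--             check=False
--         else:
--             check=True
--     ret.append((line[1]))
--     return ret
-- ===== SOURCE B (Python) =====
-- def pa_param(line):
--     s, last = line
--     idx = [i for i, c in enumerate(s) if c != '-']
--     return [s[i:i+2] for i in idx[::2]] + [last]
-- ===== Notes on version B (the rewrite author's own statement) =====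
-- stated objective: alternative
-- what changed: B replaces A's single-pass boolean-toggle accumulator loop by a two-phase computation: build the list of non-dash indices via enumerate+filter, take every other index (idx[::2]), and map each to the slice s[i:i+2], then append line[1].
import Mathlib
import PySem

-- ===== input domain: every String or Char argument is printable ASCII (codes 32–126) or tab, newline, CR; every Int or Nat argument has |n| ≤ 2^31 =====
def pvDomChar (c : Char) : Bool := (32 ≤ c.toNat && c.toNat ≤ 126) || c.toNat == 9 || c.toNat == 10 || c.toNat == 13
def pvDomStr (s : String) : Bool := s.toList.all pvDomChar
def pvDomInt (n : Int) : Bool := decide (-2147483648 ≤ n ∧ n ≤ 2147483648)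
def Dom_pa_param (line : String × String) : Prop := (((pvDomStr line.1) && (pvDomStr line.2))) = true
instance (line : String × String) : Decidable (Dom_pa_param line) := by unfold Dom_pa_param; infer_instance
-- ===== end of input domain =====

-- B restructures A's one-pass toggle loop into: non-dash index table, stride-2 selection, slice map (objective: alternative decomposition).

-- ===== PORT A =====
def pa_param (line : String × String) : List String :=
  let st := (PySem.List.pyRange 0 (PySem.Str.len line.1) 1).foldl
    (fun (st : List String × Bool) i =>
      if PySem.Str.pyGet? line.1 i = some '-' then st
      else if st.2 then (st.1 ++ [PySem.Str.slice line.1 (some i) (some (i + 2))], false)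
      else (st.1, true)) ([], true)
  st.1 ++ [line.2]

-- ===== PORT B =====
-- hand port of idx[::2] (stride-2 selection starting at element 0; exact for step 2 on any list)
def stride2 : List Int → List Int
  | [] => []
  | [x] => [x]
  | x :: _ :: xs => x :: stride2 xs

def pa_param_alt (line : String × String) : List String :=
  let idx := ((PySem.List.enumerate line.1.toList 0).filter (fun p => p.2 ≠ '-')).map (·.1)
  (stride2 idx).map (fun i => PySem.Str.slice line.1 (some i) (some (i + 2))) ++ [line.2]

-- ===== PRECONDITION & SPEC =====
def Spec_pa_param (line : String × String) (out : List String) : Prop := out = pa_param_alt line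
instance (line : String × String) (out : List String) : Decidable (Spec_pa_param line out) := by unfold Spec_pa_param; infer_instance

-- ===== CLAIM (what is proved, stated in full; the proofs are below) =====
def Claim_equal_pa_param : Prop := ∀ (line : String × String), Dom_pa_param line → Spec_pa_param line (pa_param line)

-- ===== LEMMAS AND PROOFS =====

-- alternating selector: `sel true` keeps elements 0,2,4,…; `sel false` keeps 1,3,5,…
def sel : Bool → List Int → List Int
  | _, [] => []
  | true, x :: xs => x :: sel false xs
  | false, _ :: xs => sel true xs

theorem stride2_eq_sel_true : ∀ (l : List Int), stride2 l = sel true l := by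
  intro l
  induction l using stride2.induct with
  | case1 => rfl
  | case2 x => rfl
  | case3 x y xs ih => simp [stride2, sel, ih]

-- the non-dash index table of B, parameterised by the enumeration start
def nd (cs : List Char) (k : Int) : List Int :=
  ((PySem.List.enumerate cs k).filter (fun p => p.2 ≠ '-')).map (·.1)

theorem nd_nil (k : Int) : nd [] k = [] := rfl

theorem nd_cons (c : Char) (cs : List Char) (k : Int) :
    nd (c :: cs) k = if c = '-' then nd cs (k + 1) else k :: nd cs (k + 1) := by
  simp only [nd, PySem.List.enumerate_cons, List.filter_cons]
  by_cases h : c = '-' <;> simp [h]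

-- the main loop invariant for A's fold, over the suffix of the string still to process
theorem loopA (s : String) :
    ∀ (suf pre : List Char) (acc : List String) (check : Bool),
      s.toList = pre ++ suf →
      ∃ b, (PySem.List.pyRange (pre.length : Int) (s.toList.length : Int) 1).foldl
            (fun (st : List String × Bool) i =>
              if PySem.Str.pyGet? s i = some '-' then st
              else if st.2 then (st.1 ++ [PySem.Str.slice s (some i) (some (i + 2))], false)
              else (st.1, true)) (acc, check)
          = (acc ++ (sel check (nd suf (pre.length : Int))).map
                (fun i => PySem.Str.slice s (some i) (some (i + 2))), b) := by
  intro suf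
  induction suf with
  | nil =>
    intro pre acc check h
    have hlen : s.toList.length = pre.length := by simp [h]
    refine ⟨check, ?_⟩
    rw [PySem.List.pyRange_one_eq_nil (by omega)]
    simp [nd_nil, sel]
  | cons c cs ih =>
    intro pre acc check h
    have hlt : (pre.length : Int) < (s.toList.length : Int) := by simp [h]
    rw [PySem.List.pyRange_one_cons hlt]
    have hget : PySem.Str.pyGet? s (pre.length : Int) = some c := by
      rw [PySem.Str.pyGet?_natCast, h]
      simp
    have hpre : s.toList = (pre ++ [c]) ++ cs := by simp [h]
    have hlen1 : ((pre ++ [c]).length : Int) = (pre.length : Int) + 1 := by simp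
    simp only [List.foldl_cons, hget]
    rw [nd_cons]
    by_cases hc : c = '-'
    · -- dash: state unchanged
      simp only [hc, reduceIte]
      obtain ⟨b, hb⟩ := ih (pre ++ [c]) acc check hpre
      rw [hlen1] at hb
      exact ⟨b, hb⟩
    · have hne : ¬ (some c = some '-') := by simp [hc]
      simp only [if_neg hne, if_neg hc]
      cases check with
      | true =>
        simp only [sel, List.map_cons, reduceIte]
        obtain ⟨b, hb⟩ := ih (pre ++ [c]) (acc ++ [PySem.Str.slice s (some (pre.length : Int)) (some ((pre.length : Int) + 2))]) false hpre
        rw [hlen1] at hb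
        refine ⟨b, ?_⟩
        rw [hb]
        simp
      | false =>
        simp only [sel]
        obtain ⟨b, hb⟩ := ih (pre ++ [c]) acc true hpre
        rw [hlen1] at hb
        exact ⟨b, hb⟩

-- ===== VERDICT (by name: the statement is the Claim_ definition above) =====
theorem pa_param_spec : Claim_equal_pa_param := by
  intro line _
  unfold Spec_pa_param pa_param pa_param_alt
  obtain ⟨b, hb⟩ := loopA line.1 line.1.toList [] [] true rfl
  have hlen : PySem.Str.len line.1 = (line.1.toList.length : Int) := by
    simp [PySem.Str.len_eq]
  simp only [List.length_nil, Nat.cast_zero] at hb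
  rw [hlen, hb]
  simp [stride2_eq_sel_true, nd]
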